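-- pv_equiv track=rewrite | github.com/kgirtz/AdventOfCode | AoC2019/Day 4/Day 4.py | viable
-- ===== SOURCE A (Python) =====
-- def viable(password: int) -> bool:
--     twins: bool = False
--     digit: int = password % 10
--     remainder: int = password // 10
--
--     while remainder:
--         next_digit: int = remainder % 10
--
--         if next_digit > digit:
--             return False
--         if next_digit == digit:
--             twins = True
--
--         digit = next_digit
--         remainder //= 10
--
--     return twins
-- ===== SOURCE B (Python) =====
-- def viable(password: int) -> bool:
--     s = str(password)
--     return sorted(s) == list(s) and len(set(s)) < len(s)
-- ===== Notes on version B (the rewrite author's own statement) =====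
-- stated objective: idiomatic
-- what changed: Replaces A's right-to-left modular digit-extraction loop and in-loop twin flag with the classic AoC idiom on the decimal string: password is viable iff its string equals its own sorted string (digits non-decreasing) and its distinct-character count is smaller than its length (some repeated digit); no pairwise scan or mutable state at all.
-- outside the precondition, e.g. on viable(-19): A returns False, B returns False; on viable(-22): A returns False, B returns True; on viable(-1): A does not finish within the time limit, B returns False
import Mathlib
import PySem

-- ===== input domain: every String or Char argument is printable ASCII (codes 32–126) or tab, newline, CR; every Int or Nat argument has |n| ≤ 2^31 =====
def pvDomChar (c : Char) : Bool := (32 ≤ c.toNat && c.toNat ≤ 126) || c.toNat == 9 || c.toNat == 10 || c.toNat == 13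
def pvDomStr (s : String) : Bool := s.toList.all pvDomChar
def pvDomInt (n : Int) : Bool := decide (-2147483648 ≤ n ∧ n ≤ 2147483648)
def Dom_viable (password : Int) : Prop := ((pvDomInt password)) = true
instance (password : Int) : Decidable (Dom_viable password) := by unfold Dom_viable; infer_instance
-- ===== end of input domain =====

-- B drops A's right-to-left modular digit-extraction loop and twin flag entirely:
-- on the decimal string it checks sorted(s) == list(s) (digits non-decreasing) and
-- len(set(s)) < len(s) (some repeated digit); same cost on ≤ 10-digit inputs, more idiomatic.

-- ===== PORT A =====
-- A's while-loop; fuel makes it total in Lean (for 0 ≤ remainder the fuel is never exhausted;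
-- on negative input Python's loop can diverge — excluded by Pre_viable below).
def viableLoop : Nat → Int → Int → Bool → Bool
  | 0, _, _, twins => twins
  | fuel+1, digit, remainder, twins =>
    if remainder = 0 then twins
    else
      let nextDigit := PySem.Int.mod remainder 10
      if digit < nextDigit then false
      else viableLoop fuel nextDigit (PySem.Int.floordiv remainder 10) (twins || (nextDigit == digit))

def viable (password : Int) : Bool :=
  viableLoop (password.natAbs + 1) (PySem.Int.mod password 10) (PySem.Int.floordiv password 10) false

-- ===== PORT B =====
def viable_alt (password : Int) : Bool :=
  let s := PySem.Int.toChars password                    -- s = str(password)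
  (PySem.List.sorted s (fun c => c) == s)                -- sorted(s) == list(s)
    && decide ((PySem.Set.ofList s).length < s.length)   -- len(set(s)) < len(s)

-- ===== PRECONDITION & SPEC =====
-- Pre_ excludes negative passwords: there Python A's floor-division loop is not guaranteed
-- to terminate (the remainder gets stuck at -1, e.g. for password = -1), and where it does
-- return, the value comes from the trailing nines that floor division manufactures rather
-- than from the number's own digits; only non-negative inputs are claimed.
def Pre_viable (password : Int) : Prop := 0 ≤ password
instance (password : Int) : Decidable (Pre_viable password) := by unfold Pre_viable; infer_instance
def pvWitness_viable : Int := 122345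
def Spec_viable (password : Int) (out : Bool) : Prop := out = viable_alt password
instance (password : Int) (out : Bool) : Decidable (Spec_viable password out) := by unfold Spec_viable; infer_instance

-- ===== CLAIM (what is proved, stated in full; the proofs are below) =====
def Claim_equal_viable : Prop := ∀ (password : Int), Dom_viable password → Pre_viable password → Spec_viable password (viable password)

-- ===== LEMMAS AND PROOFS =====

-- "some adjacent pair of l satisfies p"
def adjAny {α : Type} (p : α → α → Bool) : List α → Bool
  | a :: b :: t => p a b || adjAny p (b :: t)
  | _ => false

theorem adjAny_concat {α : Type} (p : α → α → Bool) (l : List α) (x : α) :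
    adjAny p (l ++ [x]) = (adjAny p l || l.getLast?.elim false (fun b => p b x)) := by
  induction l with
  | nil => rfl
  | cons a t ih =>
    cases t with
    | nil => simp [adjAny]
    | cons b t' =>
      simp only [List.cons_append, adjAny] at ih ⊢
      rw [ih, List.getLast?_cons_cons, Bool.or_assoc]

theorem adjAny_reverse {α : Type} (p : α → α → Bool) (l : List α) :
    adjAny p l.reverse = adjAny (fun a b => p b a) l := by
  induction l with
  | nil => rfl
  | cons a t ih =>
    rw [List.reverse_cons, adjAny_concat, ih, List.getLast?_reverse]
    cases t with
    | nil => rfl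
    | cons b t' => simp [adjAny, Bool.or_comm]

theorem adjAny_map {α β : Type} (f : α → β) (p : β → β → Bool) (l : List α) :
    adjAny p (l.map f) = adjAny (fun a b => p (f a) (f b)) l := by
  induction l with
  | nil => rfl
  | cons a t ih =>
    cases t with
    | nil => rfl
    | cons b t' => simpa [adjAny] using congrArg (fun x => p (f a) (f b) || x) ih

theorem adjAny_congr {α : Type} (p q : α → α → Bool) (l : List α)
    (h : ∀ a ∈ l, ∀ b ∈ l, p a b = q a b) : adjAny p l = adjAny q l := by
  induction l with
  | nil => rfl
  | cons a t ih =>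
    cases t with
    | nil => rfl
    | cons b t' =>
      rw [adjAny, adjAny, h a (by simp) b (by simp),
        ih (fun x hx y hy => h x (List.mem_cons_of_mem _ hx) y (List.mem_cons_of_mem _ hy))]

-- no adjacent strict decrease ↔ the list is non-decreasing throughout
theorem adjAny_lt_false_iff_pairwise {α : Type} [LinearOrder α] (l : List α) :
    adjAny (fun a b => decide (b < a)) l = false ↔ l.Pairwise (· ≤ ·) := by
  induction l with
  | nil => simp [adjAny]
  | cons a t ih =>
    cases t with
    | nil => simp [adjAny]
    | cons b t' =>
      rw [adjAny, Bool.or_eq_false_iff, decide_eq_false_iff_not, not_lt, ih]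
      constructor
      · rintro ⟨hab, hp⟩
        refine List.pairwise_cons.mpr ⟨?_, hp⟩
        intro x hx
        rcases List.mem_cons.mp hx with rfl | hx'
        · exact hab
        · exact le_trans hab (List.rel_of_pairwise_cons hp hx')
      · intro hp
        exact ⟨List.rel_of_pairwise_cons hp (by simp), hp.sublist (List.sublist_cons_self _ _)⟩

-- an adjacent equal pair means a duplicate
theorem not_nodup_of_adjAny_beq {α : Type} [DecidableEq α] (l : List α)
    (h : adjAny (fun a b => a == b) l = true) : ¬ l.Nodup := by
  induction l with
  | nil => simp [adjAny] at h
  | cons a t ih =>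
    cases t with
    | nil => simp [adjAny] at h
    | cons b t' =>
      rw [adjAny, Bool.or_eq_true] at h
      intro hn
      rcases h with h | h
      · exact (List.nodup_cons.mp hn).1 (by simp [beq_iff_eq.mp h])
      · exact ih h (List.nodup_cons.mp hn).2

-- in a non-decreasing list a duplicate forces an adjacent equal pair
theorem adjAny_beq_of_not_nodup {α : Type} [LinearOrder α] [DecidableEq α] (l : List α)
    (hp : l.Pairwise (· ≤ ·)) (h : ¬ l.Nodup) : adjAny (fun a b => a == b) l = true := by
  induction l with
  | nil => exact absurd List.nodup_nil h
  | cons a t ih =>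
    cases t with
    | nil => exact absurd (List.nodup_singleton a) h
    | cons b t' =>
      rw [adjAny, Bool.or_eq_true]
      rw [List.nodup_cons, not_and_or, not_not] at h
      rcases h with hmem | htail
      · rcases List.mem_cons.mp hmem with rfl | hmem'
        · exact Or.inl (beq_self_eq_true a)
        · have hab : a ≤ b := List.rel_of_pairwise_cons hp (by simp)
          have hba : b ≤ a :=
            List.rel_of_pairwise_cons (hp.sublist (List.sublist_cons_self _ _)) hmem'
          exact Or.inl (beq_iff_eq.mpr (le_antisymm hab hba))
      · exact Or.inr (ih (hp.sublist (List.sublist_cons_self _ _)) htail)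

-- set(xs) is a sublist of xs (first occurrences, in order)
theorem ofList_sublist {α : Type} [BEq α] (l : List α) : (PySem.Set.ofList l).Sublist l := by
  suffices h : ∀ (l : List α) (acc p : List α), acc.Sublist p →
      (l.foldl PySem.Set.add acc).Sublist (p ++ l) by
    simpa using h l [] [] (List.Sublist.refl [])
  intro l
  induction l with
  | nil => intro acc p h; simpa using h
  | cons x t ih =>
    intro acc p h
    have hadd : (PySem.Set.add acc x).Sublist (p ++ [x]) := by
      rw [PySem.Set.add]
      split
      · exact h.trans (List.sublist_append_left p [x])
      · exact h.append (List.Sublist.refl [x])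
    simpa [List.append_assoc] using ih (PySem.Set.add acc x) (p ++ [x]) hadd

theorem ofList_length_lt_iff {α : Type} [DecidableEq α] (l : List α) :
    (PySem.Set.ofList l).length < l.length ↔ ¬ l.Nodup := by
  have hsub := ofList_sublist l
  constructor
  · intro hlt hn
    have hsubset : l ⊆ PySem.Set.ofList l := fun x hx => (PySem.Set.mem_ofList l x).mpr hx
    have hle : l.length ≤ (PySem.Set.ofList l).length :=
      calc l.length = l.toFinset.card := (List.toFinset_card_of_nodup hn).symm
        _ ≤ (PySem.Set.ofList l).toFinset.card := Finset.card_le_card (fun x hx => by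
            simp only [List.mem_toFinset] at *; exact hsubset hx)
        _ ≤ (PySem.Set.ofList l).length := (PySem.Set.ofList l).toFinset_card_le
    omega
  · intro hn
    rcases lt_or_eq_of_le hsub.length_le with hlt | heq
    · exact hlt
    · exact absurd (hsub.eq_of_length heq ▸ PySem.Set.nodup_ofList l) hn

theorem digitChar_lt (a b : Nat) (ha : a < 10) (hb : b < 10) :
    decide (Nat.digitChar a < Nat.digitChar b) = decide (a < b) := by
  interval_cases a <;> interval_cases b <;> decide

theorem digitChar_beq (a b : Nat) (ha : a < 10) (hb : b < 10) :
    (Nat.digitChar a == Nat.digitChar b) = (a == b) := by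
  interval_cases a <;> interval_cases b <;> decide

theorem toDigitsCore_eq (f : Nat) : ∀ (n : Nat) (l : List Char), n < f →
    Nat.toDigitsCore 10 f n l =
      (if n = 0 then '0' :: l else ((Nat.digits 10 n).reverse.map Nat.digitChar) ++ l) := by
  induction f with
  | zero => intro n l h; omega
  | succ f ih =>
    intro n l h
    rw [Nat.toDigitsCore]
    by_cases h0 : n = 0
    · simp [h0, Nat.digitChar]
    · by_cases h1 : n / 10 = 0
      · have hlt : n < 10 := by omega
        rw [if_pos h1, if_neg h0, Nat.digits_def' (by norm_num) (by omega), h1]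
        simp [Nat.mod_eq_of_lt hlt]
      · have hrec : n / 10 < f := lt_of_lt_of_le (Nat.div_lt_self (by omega) (by norm_num)) (by omega)
        rw [if_neg h1, ih (n / 10) _ hrec, if_neg h1, if_neg h0,
          Nat.digits_def' (b := 10) (by norm_num) (show 0 < n by omega)]
        simp only [List.reverse_cons, List.map_append, List.map_cons, List.map_nil,
          List.append_assoc, List.cons_append, List.nil_append]

theorem toChars_natCast (n : Nat) :
    PySem.Int.toChars (n : Int) =
      (if n = 0 then ['0'] else (Nat.digits 10 n).reverse.map Nat.digitChar) := by
  rw [PySem.Int.toChars]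
  rw [if_neg (by omega)]
  simp only [Int.toNat_natCast, Nat.toDigits]
  rw [toDigitsCore_eq (n + 1) n [] (by omega)]
  by_cases h0 : n = 0 <;> simp [h0]

theorem viableLoop_spec (f : Nat) : ∀ (r d : Int) (t : Bool), 0 ≤ r → 0 ≤ d → r.toNat < f →
    viableLoop f d r t =
      (if adjAny (fun a b => decide (a < b)) (d.toNat :: Nat.digits 10 r.toNat) then false
       else t || adjAny (fun a b => a == b) (d.toNat :: Nat.digits 10 r.toNat)) := by
  induction f with
  | zero => intro r d t hr hd h; omega
  | succ f ih =>
    intro r d t hr hd h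
    rw [viableLoop]
    by_cases h0 : r = 0
    · simp [h0, adjAny]
    · have hrpos : 0 < r.toNat := by omega
      obtain ⟨m, rfl⟩ : ∃ m : Nat, r = (m : Int) := ⟨r.toNat, (Int.toNat_of_nonneg hr).symm⟩
      obtain ⟨e, rfl⟩ : ∃ e : Nat, d = (e : Int) := ⟨d.toNat, (Int.toNat_of_nonneg hd).symm⟩
      rw [if_neg h0]
      have hdig : Nat.digits 10 ((m : Int).toNat) = m % 10 :: Nat.digits 10 (m / 10) := by
        simpa using Nat.digits_def' (b := 10) (by norm_num) (n := m) (by omega)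
      rw [hdig]
      have hm10 : PySem.Int.mod ((m : Int)) 10 = ((m % 10 : Nat) : Int) := by
        exact_mod_cast PySem.Int.mod_natCast m 10
      have hf10 : PySem.Int.floordiv ((m : Int)) 10 = ((m / 10 : Nat) : Int) := by
        exact_mod_cast PySem.Int.floordiv_natCast m 10
      rw [hm10, hf10]
      by_cases hgt : (e : Int) < ((m % 10 : Nat) : Int)
      · rw [if_pos hgt]
        have : decide (((e:Int).toNat) < m % 10) = true := by simp; omega
        simp only [adjAny, Int.toNat_natCast] at *
        rw [if_pos (by simp at this ⊢; omega)]
      · rw [if_neg hgt]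
        rw [ih _ _ _ (by positivity) (by positivity) (by simp; omega)]
        have hnotlt : ¬ (e : Int).toNat < m % 10 := by omega
        simp only [Int.toNat_natCast] at *
        rw [show adjAny (fun a b => decide (a < b)) (e :: m % 10 :: Nat.digits 10 (m / 10))
            = (decide (e < m % 10) || adjAny (fun a b => decide (a < b)) (m % 10 :: Nat.digits 10 (m / 10))) from rfl]
        rw [decide_eq_false hnotlt, Bool.false_or]
        by_cases hA : adjAny (fun a b => decide (a < b)) (m % 10 :: Nat.digits 10 (m / 10)) = true
        · rw [if_pos hA, if_pos hA]
        · rw [if_neg hA, if_neg hA]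
          rw [show adjAny (fun a b => a == b) (e :: m % 10 :: Nat.digits 10 (m / 10))
              = ((e == m % 10) || adjAny (fun a b => a == b) (m % 10 :: Nat.digits 10 (m / 10))) from rfl]
          have hbeq : (((m % 10 : Nat) : Int) == (e : Int)) = (e == m % 10) := by
            by_cases hem : e = m % 10
            · simp [hem]
            · simp [hem, eq_comm]
              omega
          rw [hbeq, Bool.or_assoc]

theorem viable_spec : Claim_equal_viable := by
  intro password _ hpre
  unfold Spec_viable
  obtain ⟨n, rfl⟩ : ∃ m : Nat, password = (m : Int) :=
    ⟨password.toNat, (Int.toNat_of_nonneg hpre).symm⟩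
  by_cases h0 : n = 0
  · subst h0; decide
  · have hlt10 : ∀ x ∈ Nat.digits 10 n, x < 10 := fun x hx => Nat.digits_lt_base (by norm_num) hx
    have hdig : n % 10 :: Nat.digits 10 (n / 10) = Nat.digits 10 n :=
      (Nat.digits_def' (b := 10) (by norm_num) (by omega)).symm
    have hm10 : PySem.Int.mod ((n : Int)) 10 = ((n % 10 : Nat) : Int) := by
      exact_mod_cast PySem.Int.mod_natCast n 10
    have hf10 : PySem.Int.floordiv ((n : Int)) 10 = ((n / 10 : Nat) : Int) := by
      exact_mod_cast PySem.Int.floordiv_natCast n 10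
    -- A side: reduce to adjacent-pair tests on the digit list
    rw [viable, hm10, hf10, Int.natAbs_natCast,
      viableLoop_spec (n + 1) _ _ false (by positivity) (by positivity)
        (by simp only [Int.toNat_natCast]; exact Nat.lt_succ_of_le (Nat.div_le_self n 10))]
    simp only [Int.toNat_natCast, Bool.false_or]
    rw [hdig]
    -- B side: expose the decimal character string s
    rw [viable_alt]
    rw [show PySem.Int.toChars ((n : Int)) = (Nat.digits 10 n).reverse.map Nat.digitChar from by
      rw [toChars_natCast, if_neg h0]]
    set s : List Char := (Nat.digits 10 n).reverse.map Nat.digitChar with hs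
    -- the digit-list pair tests equal the char-list pair tests on s
    have hq1 : adjAny (fun a b => decide (a < b)) (Nat.digits 10 n)
        = adjAny (fun a b : Char => decide (b < a)) s := by
      rw [hs, adjAny_map, adjAny_reverse]
      exact (adjAny_congr _ _ _ (fun a ha b hb =>
        digitChar_lt a b (hlt10 a ha) (hlt10 b hb))).symm
    have hq2 : adjAny (fun a b : Nat => a == b) (Nat.digits 10 n)
        = adjAny (fun a b : Char => a == b) s := by
      rw [hs, adjAny_map, adjAny_reverse]
      refine (adjAny_congr _ _ _ (fun a ha b hb => ?_)).symm
      show (Nat.digitChar b == Nat.digitChar a) = (a == b)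
      rw [digitChar_beq b a (hlt10 b hb) (hlt10 a ha)]
      by_cases h : a = b
      · simp [h]
      · simp [h, Ne.symm h]
    rw [hq1, hq2]
    by_cases hp : s.Pairwise (· ≤ ·)
    · rw [if_neg (by rw [(adjAny_lt_false_iff_pairwise s).mpr hp]; simp),
        PySem.List.sorted_eq_self_of_pairwise s (fun c => c) hp]
      simp only [beq_self_eq_true, Bool.true_and]
      by_cases hn : s.Nodup
      · rw [decide_eq_false (by rw [ofList_length_lt_iff]; exact not_not_intro hn)]
        cases hadj : adjAny (fun a b : Char => a == b) s with
        | false => rfl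
        | true => exact absurd hn (not_nodup_of_adjAny_beq s hadj)
      · rw [decide_eq_true ((ofList_length_lt_iff s).mpr hn),
          adjAny_beq_of_not_nodup s hp hn]
    · rw [if_pos (by
        cases hadj : adjAny (fun a b : Char => decide (b < a)) s with
        | false => exact absurd ((adjAny_lt_false_iff_pairwise s).mp hadj) hp
        | true => rfl)]
      have hne : PySem.List.sorted s (fun c => c) ≠ s := fun heq =>
        hp (by simpa using heq ▸ PySem.List.sorted_pairwise s (fun c => c))
      rw [beq_eq_false_iff_ne.mpr hne, Bool.false_and]
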